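-- pv_equiv track=rewrite | github.com/Banbury-inc/NeuraNet | Multiple_Knapsack_Algorithm/algorithms/knapsack_just_to_store.py | multiple_knapsack_with_file_sharing
-- ===== SOURCE A (Python) =====
-- def multiple_knapsack_with_file_sharing(files, devices, parts):
--     num_files = len(files)
--     num_devices = len(devices)
--
--     # Create a 3D array to store the intermediate results of subproblems
--     dp = [[[0 for _ in range(num_devices + 1)] for _ in range(parts + 1)] for _ in range(num_files + 1)]
--
--     # Dynamic programming computation
--     for i in range(1, num_files + 1):
--         file_size = files[i - 1]
--         for p in range(1, parts + 1):
--             for j in range(1, num_devices + 1):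
--                 device_capacity = devices[j - 1]
--                 dp[i][p][j] = dp[i - 1][p][j]  # Without selecting the current file
--                 for k in range(1, min(device_capacity // (file_size // p), i) + 1):
--                     if dp[i - k][p - 1][j - 1] + (k * (file_size // p)) > dp[i][p][j]:
--                         dp[i][p][j] = dp[i - k][p - 1][j - 1] + (k * (file_size // p))
--
--     # Backtracking to find the optimal allocation with limited file sharing
--     optimal_allocation = []
--     i, p, j = num_files, parts, num_devices
--     while i > 0 and p > 0 and j > 0:
--         k = 0
--         while k < parts and dp[i][p][j] == dp[i][p][j - 1]:
--             k += 1
--         for _ in range(k):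
--             optimal_allocation.append((i - 1, p - 1, j - 1))  # (file index, part, device index)
--         i -= k
--         p -= 1
--         j -= 1
--
--     # Optimal total storage with limited file sharing and the allocation strategy
--     total_storage = dp[num_files][parts][num_devices]
--     return total_storage, optimal_allocation
-- ===== SOURCE B (Python) =====
-- def multiple_knapsack_with_file_sharing(files, devices, parts):
--     # Top-down memoized recursion instead of the eager triple-nested dp table:
--     # only reachable (i, p, j) states are ever computed.
--     num_files = len(files)
--     num_devices = len(devices)
--     memo = {}
--
--     def solve(i, p, j):
--         if i <= 0 or p <= 0 or j <= 0:
--             return 0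
--         key = (i, p, j)
--         if key in memo:
--             return memo[key]
--         share = files[i - 1] // p
--         best = solve(i - 1, p, j)
--         for k in range(1, min(devices[j - 1] // share, i) + 1):
--             cand = solve(i - k, p - 1, j - 1) + k * share
--             if cand > best:
--                 best = cand
--         memo[key] = best
--         return best
--
--     total_storage = solve(num_files, parts, num_devices)
--
--     optimal_allocation = []
--     i, p, j = num_files, parts, num_devices
--     while i > 0 and p > 0 and j > 0:
--         # the loop guard gives p > 0, hence parts > 0 here
--         k = parts if solve(i, p, j) == solve(i, p, j - 1) else 0
--         for _ in range(k):
--             optimal_allocation.append((i - 1, p - 1, j - 1))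
--         i -= k
--         p -= 1
--         j -= 1
--
--     return total_storage, optimal_allocation
-- ===== Notes on version B (the rewrite author's own statement) =====
-- stated objective: alternative
-- what changed: The eager triple-nested bottom-up dp-table fill is replaced by a top-down memoized recursion solve(i,p,j) that only evaluates states actually reachable from (num_files, parts, num_devices), and the backtracking inner while-loop, whose condition does not depend on its counter, is collapsed to the equivalent 'k = parts if equal else 0'.
-- crash fix: On parts < 0 Python A raises IndexError (dp[num_files][parts] indexes the empty inner lists) while B returns (0, []). — e.g. on multiple_knapsack_with_file_sharing([4], [5], -1): A raises IndexError, B returns (0, [])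
import Mathlib
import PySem

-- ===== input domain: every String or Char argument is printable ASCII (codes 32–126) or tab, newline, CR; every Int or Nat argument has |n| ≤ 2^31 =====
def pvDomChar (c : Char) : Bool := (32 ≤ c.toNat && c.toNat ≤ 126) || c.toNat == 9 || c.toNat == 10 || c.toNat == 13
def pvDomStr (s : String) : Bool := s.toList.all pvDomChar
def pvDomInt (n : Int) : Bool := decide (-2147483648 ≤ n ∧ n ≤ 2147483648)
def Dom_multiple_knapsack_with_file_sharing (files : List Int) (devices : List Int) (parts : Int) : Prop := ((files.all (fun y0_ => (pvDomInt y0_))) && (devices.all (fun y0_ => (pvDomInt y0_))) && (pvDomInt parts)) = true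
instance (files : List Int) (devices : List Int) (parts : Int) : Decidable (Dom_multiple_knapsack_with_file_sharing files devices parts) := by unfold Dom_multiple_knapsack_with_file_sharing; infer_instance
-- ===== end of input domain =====

-- B replaces A's eager triple-nested bottom-up dp fill by a top-down recursion that only
-- evaluates reachable states (objective: alternative). Equivalence is about return values (no mutation).

-- ===== PORT A =====
-- files[i] / devices[j] where Python's index is always in range on the executed paths
def pvGet (xs : List Int) (i : Int) : Int := (PySem.List.pyGet? xs i).getD 0

-- the 3D dp array (all cells initially 0) as a point-updatable map: dp[a][b][c] = v
def dpGet (dp : PySem.Dict (Int × Int × Int) Int) (x y z : Int) : Int :=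
  PySem.Dict.getD dp (x, y, z) 0

def dpSet (dp : PySem.Dict (Int × Int × Int) Int) (a b c v : Int) :
    PySem.Dict (Int × Int × Int) Int :=
  PySem.Dict.insert dp (a, b, c) v

-- inner 'for k in range(...)' loop of A
def kfoldA (i p j sh : Int) (ks : List Int) (dp : PySem.Dict (Int × Int × Int) Int) :
    PySem.Dict (Int × Int × Int) Int :=
  ks.foldl (fun dp k =>
    if dpGet dp (i-k) (p-1) (j-1) + k * sh > dpGet dp i p j
    then dpSet dp i p j (dpGet dp (i-k) (p-1) (j-1) + k * sh) else dp) dp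

-- body of A's 'for j in range(1, num_devices+1)' loop
def cellA (devices : List Int) (fs i p : Int) (dp : PySem.Dict (Int × Int × Int) Int) (j : Int) :
    PySem.Dict (Int × Int × Int) Int :=
  let cap := pvGet devices (j-1)
  let sh := PySem.Int.floordiv fs p
  let dp1 := dpSet dp i p j (dpGet dp (i-1) p j)
  kfoldA i p j sh (PySem.List.pyRange 1 (min (PySem.Int.floordiv cap sh) i + 1) 1) dp1

-- A's dynamic-programming phase (the triple-nested loop)
def dpFill (files devices : List Int) (parts : Int) : PySem.Dict (Int × Int × Int) Int :=
  (PySem.List.pyRange 1 ((files.length : Int) + 1) 1).foldl (fun dp i =>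
    let fs := pvGet files (i-1)
    (PySem.List.pyRange 1 (parts + 1) 1).foldl (fun dp p =>
      (PySem.List.pyRange 1 ((devices.length : Int) + 1) 1).foldl
        (fun dp j => cellA devices fs i p dp j) dp) dp) PySem.Dict.empty

-- A's inner 'while k < parts and dp[i][p][j] == dp[i][p][j-1]: k += 1'
def whileK (u v parts k : Int) : Int :=
  if k < parts ∧ u = v then whileK u v parts (k+1) else k
termination_by (parts - k).toNat
decreasing_by omega

-- A's backtracking 'while i > 0 and p > 0 and j > 0' loop
def backA (dp : PySem.Dict (Int × Int × Int) Int) (parts i p j : Int)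
    (acc : List (Int × Int × Int)) : List (Int × Int × Int) :=
  if 0 < i ∧ 0 < p ∧ 0 < j then
    let k := whileK (dpGet dp i p j) (dpGet dp i p (j-1)) parts 0
    backA dp parts (i-k) (p-1) (j-1)
      (acc ++ (PySem.List.pyRange 0 k 1).map (fun _ => (i-1, p-1, j-1)))
  else acc
termination_by p.toNat
decreasing_by omega

def multiple_knapsack_with_file_sharing (files : List Int) (devices : List Int) (parts : Int) :
    Int × (List (Int × Int × Int)) :=
  let dp := dpFill files devices parts
  (dpGet dp files.length parts devices.length,
   backA dp parts files.length parts devices.length [])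

-- ===== PORT B =====
-- B's memoized recursive solve(i, p, j) (the memo dict is pure caching and is dropped)
def solveB (files devices : List Int) (i p j : Int) : Int :=
  if i ≤ 0 ∨ p ≤ 0 ∨ j ≤ 0 then 0
  else
    let share := PySem.Int.floordiv (pvGet files (i-1)) p
    let best := solveB files devices (i-1) p j
    (PySem.List.pyRange 1 (min (PySem.Int.floordiv (pvGet devices (j-1)) share) i + 1) 1).foldl
      (fun best k =>
        let cand := solveB files devices (i-k) (p-1) (j-1) + k * share
        if cand > best then cand else best) best
termination_by (p.toNat, i.toNat)
decreasing_by
  · apply Prod.Lex.right; omega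
  · apply Prod.Lex.left; omega

-- B's backtracking loop
def backB (files devices : List Int) (parts i p j : Int) (acc : List (Int × Int × Int)) :
    List (Int × Int × Int) :=
  if 0 < i ∧ 0 < p ∧ 0 < j then
    let k := if solveB files devices i p j = solveB files devices i p (j-1) then parts else 0
    backB files devices parts (i-k) (p-1) (j-1)
      (acc ++ (PySem.List.pyRange 0 k 1).map (fun _ => (i-1, p-1, j-1)))
  else acc
termination_by p.toNat
decreasing_by omega

def multiple_knapsack_with_file_sharing_alt (files : List Int) (devices : List Int) (parts : Int) :
    Int × (List (Int × Int × Int)) :=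
  (solveB files devices files.length parts devices.length,
   backB files devices parts files.length parts devices.length [])

-- ===== PRECONDITION & SPEC =====
-- Pre_ is exactly where Python A returns: parts < 0 raises IndexError (dp[num_files][parts] on
-- empty inner lists), and a nonempty devices together with some file f with 0 ≤ f < parts makes
-- file_size // p == 0 for p = f+1 ≤ parts, so device_capacity // (file_size // p) raises
-- ZeroDivisionError.  (The proof uses only 0 ≤ parts: both ports share the total floordiv.)
def Pre_multiple_knapsack_with_file_sharing (files : List Int) (devices : List Int) (parts : Int) : Prop :=
  0 ≤ parts ∧ ¬ (devices ≠ [] ∧ ∃ f ∈ files, 0 ≤ f ∧ f < parts)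
instance (files : List Int) (devices : List Int) (parts : Int) : Decidable (Pre_multiple_knapsack_with_file_sharing files devices parts) := by unfold Pre_multiple_knapsack_with_file_sharing; infer_instance
def pvWitness_multiple_knapsack_with_file_sharing : List Int × List Int × Int := ([10, 7], [5, 9], 3)

-- On parts < 0, A raises IndexError (dp[num_files][parts] indexes empty inner lists) while B
-- simply returns (0, []): its recursion bottoms out and the backtracking loop is never entered.
def Raises_multiple_knapsack_with_file_sharing (files : List Int) (devices : List Int) (parts : Int) : Prop :=
  parts < 0
instance (files : List Int) (devices : List Int) (parts : Int) : Decidable (Raises_multiple_knapsack_with_file_sharing files devices parts) := by unfold Raises_multiple_knapsack_with_file_sharing; infer_instance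
def pvRaiseWitness_multiple_knapsack_with_file_sharing : List Int × List Int × Int := ([4], [5], -1)
def pvRaiseWitnessOut_multiple_knapsack_with_file_sharing : Int × (List (Int × Int × Int)) := (0, [])

def Spec_multiple_knapsack_with_file_sharing (files : List Int) (devices : List Int) (parts : Int) (out : Int × (List (Int × Int × Int))) : Prop := out = multiple_knapsack_with_file_sharing_alt files devices parts
instance (files : List Int) (devices : List Int) (parts : Int) (out : Int × (List (Int × Int × Int))) : Decidable (Spec_multiple_knapsack_with_file_sharing files devices parts out) := by unfold Spec_multiple_knapsack_with_file_sharing; infer_instance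

-- ===== CLAIM (what is proved, stated in full; the proofs are below) =====
def Claim_equal_multiple_knapsack_with_file_sharing : Prop := ∀ (files : List Int) (devices : List Int) (parts : Int), Dom_multiple_knapsack_with_file_sharing files devices parts → Pre_multiple_knapsack_with_file_sharing files devices parts → Spec_multiple_knapsack_with_file_sharing files devices parts (multiple_knapsack_with_file_sharing files devices parts)
def Claim_raises_multiple_knapsack_with_file_sharing : Prop := (∀ (files : List Int) (devices : List Int) (parts : Int), Dom_multiple_knapsack_with_file_sharing files devices parts → Raises_multiple_knapsack_with_file_sharing files devices parts → ¬ Pre_multiple_knapsack_with_file_sharing files devices parts) ∧ (Dom_multiple_knapsack_with_file_sharing (pvRaiseWitness_multiple_knapsack_with_file_sharing.1) (pvRaiseWitness_multiple_knapsack_with_file_sharing.2.1) (pvRaiseWitness_multiple_knapsack_with_file_sharing.2.2) ∧ Raises_multiple_knapsack_with_file_sharing (pvRaiseWitness_multiple_knapsack_with_file_sharing.1) (pvRaiseWitness_multiple_knapsack_with_file_sharing.2.1) (pvRaiseWitness_multiple_knapsack_with_file_sharing.2.2) ∧ multiple_knapsack_with_file_sharing_alt (pvRaiseWitness_multiple_knapsack_with_file_sharing.1)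 (pvRaiseWitness_multiple_knapsack_with_file_sharing.2.1) (pvRaiseWitness_multiple_knapsack_with_file_sharing.2.2) = pvRaiseWitnessOut_multiple_knapsack_with_file_sharing)

-- ===== LEMMAS AND PROOFS =====

-- the dp table that A's fill phase produces, as a predicate: rows 1..t are filled with solveB
def boxFun (files devices : List Int) (parts t : Int) : Int → Int → Int → Int :=
  fun x y z =>
    if 1 ≤ x ∧ x ≤ t ∧ 1 ≤ y ∧ y ≤ parts ∧ 1 ≤ z ∧ z ≤ (devices.length : Int)
    then solveB files devices x y z else 0

-- row t being filled up to part-column q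
def rowBox (files devices : List Int) (parts i q : Int) : Int → Int → Int → Int :=
  fun x y z =>
    if x = i ∧ 1 ≤ y ∧ y ≤ q ∧ 1 ≤ z ∧ z ≤ (devices.length : Int)
    then solveB files devices x y z else boxFun files devices parts (i-1) x y z

-- cell (i,p) being filled up to device-column r
def colBox (files devices : List Int) (parts i p r : Int) : Int → Int → Int → Int :=
  fun x y z =>
    if x = i ∧ y = p ∧ 1 ≤ z ∧ z ≤ r
    then solveB files devices x y z else rowBox files devices parts i (p-1) x y z

theorem solveB_zero (files devices : List Int) (i p j : Int)
    (h : i ≤ 0 ∨ p ≤ 0 ∨ j ≤ 0) : solveB files devices i p j = 0 := by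
  rw [solveB]; simp [h]

theorem boxFun_eval (files devices : List Int) (parts t x y z : Int)
    (hx : x ≤ t) (hy : y ≤ parts) (hz : z ≤ (devices.length : Int)) :
    boxFun files devices parts t x y z = solveB files devices x y z := by
  unfold boxFun
  split_ifs with h
  · rfl
  · rw [solveB_zero]
    omega

theorem dpGet_dpSet (dp : PySem.Dict (Int × Int × Int) Int) (a b c v x y z : Int) :
    dpGet (dpSet dp a b c v) x y z =
      if x = a ∧ y = b ∧ z = c then v else dpGet dp x y z := by
  unfold dpGet dpSet
  simp only [PySem.Dict.getD_insert, Prod.mk.injEq]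

theorem kfoldA_cons (i p j sh k : Int) (ks : List Int)
    (dp : PySem.Dict (Int × Int × Int) Int) :
    kfoldA i p j sh (k :: ks) dp =
      kfoldA i p j sh ks
        (if dpGet dp (i-k) (p-1) (j-1) + k * sh > dpGet dp i p j
         then dpSet dp i p j (dpGet dp (i-k) (p-1) (j-1) + k * sh) else dp) := rfl

theorem kfoldA_proj (i p j sh : Int) (ks : List Int)
    (dp : PySem.Dict (Int × Int × Int) Int)
    (x y z : Int) (hne : ¬(x = i ∧ y = p ∧ z = j)) :
    dpGet (kfoldA i p j sh ks dp) x y z = dpGet dp x y z := by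
  induction ks generalizing dp with
  | nil => rfl
  | cons k ks ih =>
    rw [kfoldA_cons, ih]
    split_ifs with h
    · rw [dpGet_dpSet, if_neg hne]
    · rfl

theorem kfoldA_cell (i p j sh : Int) (ks : List Int)
    (dp : PySem.Dict (Int × Int × Int) Int) :
    dpGet (kfoldA i p j sh ks dp) i p j =
      ks.foldl (fun best k =>
        if dpGet dp (i-k) (p-1) (j-1) + k * sh > best
        then dpGet dp (i-k) (p-1) (j-1) + k * sh else best)
        (dpGet dp i p j) := by
  induction ks generalizing dp with
  | nil => rfl
  | cons k ks ih =>
    rw [kfoldA_cons, ih]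
    have hread : ∀ x : Int,
        dpGet (if dpGet dp (i-k) (p-1) (j-1) + k * sh > dpGet dp i p j
          then dpSet dp i p j (dpGet dp (i-k) (p-1) (j-1) + k * sh) else dp)
          (i-x) (p-1) (j-1) = dpGet dp (i-x) (p-1) (j-1) := by
      intro x
      split_ifs with h
      · rw [dpGet_dpSet, if_neg (by omega)]
      · rfl
    have hcell :
        dpGet (if dpGet dp (i-k) (p-1) (j-1) + k * sh > dpGet dp i p j
          then dpSet dp i p j (dpGet dp (i-k) (p-1) (j-1) + k * sh) else dp) i p j =
          (if dpGet dp (i-k) (p-1) (j-1) + k * sh > dpGet dp i p j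
           then dpGet dp (i-k) (p-1) (j-1) + k * sh else dpGet dp i p j) := by
      split_ifs with h
      · rw [dpGet_dpSet, if_pos ⟨rfl, rfl, rfl⟩]
      · rfl
    rw [hcell]
    simp only [List.foldl_cons]
    exact PySem.List.foldl_congr_mem _ _ _ _ (by intro acc x _; rw [hread])

theorem solveB_unfold (files devices : List Int) (i p j : Int)
    (hi : 0 < i) (hp : 0 < p) (hj : 0 < j) :
    solveB files devices i p j =
      (PySem.List.pyRange 1
          (min (PySem.Int.floordiv (pvGet devices (j-1)) (PySem.Int.floordiv (pvGet files (i-1)) p)) i + 1) 1).foldl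
        (fun best k =>
          if solveB files devices (i-k) (p-1) (j-1) + k * PySem.Int.floordiv (pvGet files (i-1)) p > best
          then solveB files devices (i-k) (p-1) (j-1) + k * PySem.Int.floordiv (pvGet files (i-1)) p
          else best)
        (solveB files devices (i-1) p j) := by
  rw [solveB, if_neg (by omega)]

theorem cellA_eq (files devices : List Int) (parts i p j : Int)
    (hi : 1 ≤ i) (hp : 1 ≤ p) (hpp : p ≤ parts) (hj : 1 ≤ j) (hjm : j ≤ (devices.length : Int))
    (dp : PySem.Dict (Int × Int × Int) Int)
    (hdp : ∀ x y z, dpGet dp x y z = colBox files devices parts i p (j-1) x y z) :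
    ∀ x y z, dpGet (cellA devices (pvGet files (i-1)) i p dp j) x y z =
      colBox files devices parts i p j x y z := by
  have hprev : dpGet dp (i-1) p j = solveB files devices (i-1) p j := by
    rw [hdp]
    unfold colBox rowBox
    rw [if_neg (by omega), if_neg (by omega)]
    exact boxFun_eval _ _ _ _ _ _ _ (by omega) hpp hjm
  intro x y z
  show dpGet (kfoldA i p j (PySem.Int.floordiv (pvGet files (i-1)) p)
      (PySem.List.pyRange 1
        (min (PySem.Int.floordiv (pvGet devices (j-1)) (PySem.Int.floordiv (pvGet files (i-1)) p)) i + 1) 1)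
      (dpSet dp i p j (dpGet dp (i-1) p j))) x y z
      = colBox files devices parts i p j x y z
  by_cases hc : x = i ∧ y = p ∧ z = j
  · obtain ⟨hx, hy, hz⟩ := hc; subst hx; subst hy; subst hz
    rw [kfoldA_cell]
    have hstart : dpGet (dpSet dp x y z (dpGet dp (x-1) y z)) x y z =
        solveB files devices (x-1) y z := by
      rw [dpGet_dpSet, if_pos ⟨rfl, rfl, rfl⟩]; exact hprev
    rw [hstart]
    have hreads : ∀ k : Int, 1 ≤ k →
        dpGet (dpSet dp x y z (dpGet dp (x-1) y z)) (x-k) (y-1) (z-1) =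
          solveB files devices (x-k) (y-1) (z-1) := by
      intro k hk
      rw [dpGet_dpSet, if_neg (by omega), hdp]
      unfold colBox rowBox
      rw [if_neg (by omega), if_neg (by omega)]
      exact boxFun_eval _ _ _ _ _ _ _ (by omega) (by omega) (by omega)
    rw [PySem.List.foldl_congr_mem _ _
        (fun best k =>
          if solveB files devices (x-k) (y-1) (z-1) + k * PySem.Int.floordiv (pvGet files (x-1)) y > best
          then solveB files devices (x-k) (y-1) (z-1) + k * PySem.Int.floordiv (pvGet files (x-1)) y
          else best) _
        (by
          intro acc k hkmem
          rw [hreads k (PySem.List.mem_pyRange_one.mp hkmem).1])]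
    show _ = colBox files devices parts x y z x y z
    unfold colBox
    rw [if_pos (show x = x ∧ y = y ∧ 1 ≤ z ∧ z ≤ z from ⟨rfl, rfl, by omega, le_rfl⟩),
        solveB_unfold files devices x y z (by omega) (by omega) (by omega)]
  · rw [kfoldA_proj _ _ _ _ _ _ _ _ _ hc, dpGet_dpSet, if_neg hc, hdp]
    show colBox files devices parts i p (j-1) x y z = colBox files devices parts i p j x y z
    unfold colBox
    split_ifs <;> first | rfl | omega

theorem colFold_eq (files devices : List Int) (parts i p : Int)
    (hi : 1 ≤ i) (hp : 1 ≤ p) (hpp : p ≤ parts)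
    (dp0 : PySem.Dict (Int × Int × Int) Int)
    (hdp0 : ∀ x y z, dpGet dp0 x y z = rowBox files devices parts i (p-1) x y z) :
    ∀ x y z, dpGet ((PySem.List.pyRange 1 ((devices.length : Int) + 1) 1).foldl
        (fun dp j => cellA devices (pvGet files (i-1)) i p dp j) dp0) x y z =
      rowBox files devices parts i p x y z := by
  have colBox_top : colBox files devices parts i p (devices.length : Int) =
      rowBox files devices parts i p := by
    funext x y z; unfold colBox rowBox boxFun; split_ifs <;> first | rfl | omega
  have aux : ∀ r : Int, 0 ≤ r → r ≤ (devices.length : Int) →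
      ∀ x y z, dpGet ((PySem.List.pyRange 1 (r+1) 1).foldl
        (fun dp j => cellA devices (pvGet files (i-1)) i p dp j) dp0) x y z =
          colBox files devices parts i p r x y z := by
    intro r hr
    induction r, hr using Int.le_induction with
    | base =>
      intro _ x y z
      rw [show PySem.List.pyRange 1 (0+1) 1 = ([] : List Int) from
        PySem.List.pyRange_one_eq_nil (by omega)]
      simp only [List.foldl_nil]
      rw [hdp0]
      unfold colBox
      rw [if_neg (by omega)]
    | succ r hr ih =>
      intro hrm x y z
      rw [show PySem.List.pyRange 1 (r+1+1) 1 = PySem.List.pyRange 1 (r+1) 1 ++ [r+1] from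
        PySem.List.pyRange_one_succ_right (by omega), List.foldl_append]
      simp only [List.foldl_cons, List.foldl_nil]
      have hpre : ∀ x y z, dpGet ((PySem.List.pyRange 1 (r+1) 1).foldl
          (fun dp j => cellA devices (pvGet files (i-1)) i p dp j) dp0) x y z =
            colBox files devices parts i p ((r+1)-1) x y z := by
        rw [show (r+1:Int)-1 = r from by ring]
        exact fun x y z => ih (by omega) x y z
      exact cellA_eq files devices parts i p (r+1) hi hp hpp (by omega) hrm _ hpre x y z
  intro x y z
  exact (aux (devices.length : Int) (by positivity) le_rfl x y z).trans
    (congrFun (congrFun (congrFun colBox_top x) y) z)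

theorem rowFold_eq (files devices : List Int) (parts i : Int) (hparts : 0 ≤ parts) (hi : 1 ≤ i)
    (dp0 : PySem.Dict (Int × Int × Int) Int)
    (hdp0 : ∀ x y z, dpGet dp0 x y z = boxFun files devices parts (i-1) x y z) :
    ∀ x y z, dpGet ((PySem.List.pyRange 1 (parts + 1) 1).foldl
        (fun dp p =>
          (PySem.List.pyRange 1 ((devices.length : Int) + 1) 1).foldl
            (fun dp j => cellA devices (pvGet files (i-1)) i p dp j) dp) dp0) x y z =
      boxFun files devices parts i x y z := by
  have rowBox_top : rowBox files devices parts i parts = boxFun files devices parts i := by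
    funext x y z; unfold rowBox boxFun; split_ifs <;> first | rfl | omega
  have aux : ∀ q : Int, 0 ≤ q → q ≤ parts →
      ∀ x y z, dpGet ((PySem.List.pyRange 1 (q+1) 1).foldl
        (fun dp p =>
          (PySem.List.pyRange 1 ((devices.length : Int) + 1) 1).foldl
            (fun dp j => cellA devices (pvGet files (i-1)) i p dp j) dp) dp0) x y z =
          rowBox files devices parts i q x y z := by
    intro q hq
    induction q, hq using Int.le_induction with
    | base =>
      intro _ x y z
      rw [show PySem.List.pyRange 1 (0+1) 1 = ([] : List Int) from
        PySem.List.pyRange_one_eq_nil (by omega)]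
      simp only [List.foldl_nil]
      rw [hdp0]
      unfold rowBox
      rw [if_neg (by omega)]
    | succ q hq ih =>
      intro hqp x y z
      rw [show PySem.List.pyRange 1 (q+1+1) 1 = PySem.List.pyRange 1 (q+1) 1 ++ [q+1] from
        PySem.List.pyRange_one_succ_right (by omega), List.foldl_append]
      simp only [List.foldl_cons, List.foldl_nil]
      have hpre : ∀ x y z, dpGet ((PySem.List.pyRange 1 (q+1) 1).foldl
          (fun dp p =>
            (PySem.List.pyRange 1 ((devices.length : Int) + 1) 1).foldl
              (fun dp j => cellA devices (pvGet files (i-1)) i p dp j) dp) dp0) x y z =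
            rowBox files devices parts i ((q+1)-1) x y z := by
        rw [show (q+1:Int)-1 = q from by ring]
        exact fun x y z => ih (by omega) x y z
      exact colFold_eq files devices parts i (q+1) hi (by omega) hqp _ hpre x y z
  intro x y z
  exact (aux parts hparts le_rfl x y z).trans
    (congrFun (congrFun (congrFun rowBox_top x) y) z)

theorem dpFill_eq (files devices : List Int) (parts : Int) (hparts : 0 ≤ parts) :
    ∀ x y z, dpGet (dpFill files devices parts) x y z =
      boxFun files devices parts files.length x y z := by
  have aux : ∀ t : Int, 0 ≤ t → t ≤ (files.length : Int) →
      ∀ x y z, dpGet ((PySem.List.pyRange 1 (t+1) 1).foldl (fun dp i =>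
        let fs := pvGet files (i-1)
        (PySem.List.pyRange 1 (parts + 1) 1).foldl (fun dp p =>
          (PySem.List.pyRange 1 ((devices.length : Int) + 1) 1).foldl
            (fun dp j => cellA devices fs i p dp j) dp) dp) PySem.Dict.empty) x y z =
        boxFun files devices parts t x y z := by
    intro t ht
    induction t, ht using Int.le_induction with
    | base =>
      intro _ x y z
      rw [show PySem.List.pyRange 1 (0+1) 1 = ([] : List Int) from
        PySem.List.pyRange_one_eq_nil (by omega)]
      simp only [List.foldl_nil]
      unfold dpGet boxFun
      rw [PySem.Dict.getD_empty, if_neg (by omega)]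
    | succ t ht ih =>
      intro htn x y z
      rw [show PySem.List.pyRange 1 (t+1+1) 1 = PySem.List.pyRange 1 (t+1) 1 ++ [t+1] from
        PySem.List.pyRange_one_succ_right (by omega), List.foldl_append]
      simp only [List.foldl_cons, List.foldl_nil]
      have hpre : ∀ x y z, dpGet ((PySem.List.pyRange 1 (t+1) 1).foldl (fun dp i =>
          let fs := pvGet files (i-1)
          (PySem.List.pyRange 1 (parts + 1) 1).foldl (fun dp p =>
            (PySem.List.pyRange 1 ((devices.length : Int) + 1) 1).foldl
              (fun dp j => cellA devices fs i p dp j) dp) dp) PySem.Dict.empty) x y z =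
            boxFun files devices parts ((t+1)-1) x y z := by
        rw [show (t+1:Int)-1 = t from by ring]
        exact fun x y z => ih (by omega) x y z
      exact rowFold_eq files devices parts (t+1) hparts (by omega) _ hpre x y z
  exact aux (files.length : Int) (by positivity) le_rfl

theorem whileK_eq (u v parts k : Int) :
    whileK u v parts k = if u = v ∧ k < parts then parts else k := by
  by_cases huv : u = v
  · have aux : ∀ (N : Nat) (k : Int), (parts - k).toNat = N →
        whileK u v parts k = if k < parts then parts else k := by
      intro N
      induction N with
      | zero =>
        intro k hN
        rw [whileK, if_neg (by omega : ¬(k < parts ∧ u = v)), if_neg (by omega)]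
      | succ n ih =>
        intro k hN
        rw [whileK]
        by_cases hkp : k < parts
        · rw [if_pos ⟨hkp, huv⟩, ih (k+1) (by omega)]
          split_ifs <;> omega
        · rw [if_neg (by tauto), if_neg hkp]
    rw [aux (parts - k).toNat k rfl]
    simp [huv]
  · rw [whileK, if_neg (by tauto), if_neg (by tauto)]

theorem back_eq (files devices : List Int) (parts : Int) (hparts : 0 ≤ parts) :
    ∀ (N : Nat) (i p j : Int) (acc : List (Int × Int × Int)), p.toNat = N →
      i ≤ (files.length : Int) → p ≤ parts → j ≤ (devices.length : Int) →
      backA (dpFill files devices parts) parts i p j acc =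
        backB files devices parts i p j acc := by
  intro N
  induction N with
  | zero =>
    intro i p j acc hN hi hp hj
    rw [backA, backB, if_neg (by omega : ¬(0 < i ∧ 0 < p ∧ 0 < j)),
        if_neg (by omega : ¬(0 < i ∧ 0 < p ∧ 0 < j))]
  | succ n ih =>
    intro i p j acc hN hi hp hj
    rw [backA, backB]
    by_cases hg : 0 < i ∧ 0 < p ∧ 0 < j
    · rw [if_pos hg, if_pos hg]
      obtain ⟨hgi, hgp, hgj⟩ := hg
      have hd1 : dpGet (dpFill files devices parts) i p j = solveB files devices i p j :=
        (dpFill_eq files devices parts hparts i p j).trans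
          (boxFun_eval _ _ _ _ _ _ _ hi hp hj)
      have hd2 : dpGet (dpFill files devices parts) i p (j-1) =
          solveB files devices i p (j-1) :=
        (dpFill_eq files devices parts hparts i p (j-1)).trans
          (boxFun_eval _ _ _ _ _ _ _ hi hp (by omega))
      have hwk : whileK (dpGet (dpFill files devices parts) i p j)
          (dpGet (dpFill files devices parts) i p (j-1)) parts 0 =
            if solveB files devices i p j = solveB files devices i p (j-1)
            then parts else 0 := by
        rw [hd1, hd2, whileK_eq]
        split_ifs <;> first | rfl | omega
      simp only [hwk]
      apply ih
      · omega
      · have : (0:Int) ≤ if solveB files devices i p j = solveB files devices i p (j-1)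
            then parts else 0 := by split_ifs <;> omega
        omega
      · omega
      · omega
    · rw [if_neg hg, if_neg hg]

-- ===== VERDICT (by name: the statement is the Claim_ definition above) =====
theorem multiple_knapsack_with_file_sharing_spec : Claim_equal_multiple_knapsack_with_file_sharing := by
  intro files devices parts _ hpre
  unfold Spec_multiple_knapsack_with_file_sharing
  unfold multiple_knapsack_with_file_sharing multiple_knapsack_with_file_sharing_alt
  obtain ⟨hparts, -⟩ := hpre
  refine Prod.ext ?_ ?_
  · show dpGet (dpFill files devices parts) files.length parts devices.length = _
    exact (dpFill_eq files devices parts hparts _ _ _).trans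
      (boxFun_eval files devices parts _ _ _ _ le_rfl le_rfl le_rfl)
  · exact back_eq files devices parts hparts parts.toNat _ _ _ [] rfl le_rfl le_rfl le_rfl

def multiple_knapsack_with_file_sharing_raises : Claim_raises_multiple_knapsack_with_file_sharing := by
  unfold Claim_raises_multiple_knapsack_with_file_sharing
  exact ⟨fun files devices parts _ hr hpre => by
    unfold Raises_multiple_knapsack_with_file_sharing at hr
    unfold Pre_multiple_knapsack_with_file_sharing at hpre
    omega, ⟨by decide, by decide, by
      show (solveB [4] [5] ((1:Nat):Int) (-1) ((1:Nat):Int),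
            backB [4] [5] (-1) ((1:Nat):Int) (-1) ((1:Nat):Int) []) = (0, [])
      rw [solveB_zero _ _ _ _ _ (Or.inr (Or.inl (by norm_num))), backB]
      norm_num⟩⟩
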